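-- pv_equiv track=rewrite | github.com/Zhao-jiawang/PICASSO | picasso/core/traffic_model.py | _channel_ids_by_chiplet
-- ===== SOURCE A (Python) =====
-- from typing import Any, Dict, List, Tuple
--
-- def _channel_ids_by_chiplet(chiplet_count: int, channel_count_available: int) -> Dict[int, Tuple[int, ...]]:
--     if chiplet_count <= 0 or channel_count_available <= 0:
--         return {chiplet_id: (0,) for chiplet_id in range(max(chiplet_count, 1))}
--     mapping: Dict[int, List[int]] = {chiplet_id: [] for chiplet_id in range(chiplet_count)}
--     for channel_id in range(channel_count_available):
--         mapping[channel_id % chiplet_count].append(channel_id)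
--     for chiplet_id in range(chiplet_count):
--         if not mapping[chiplet_id]:
--             mapping[chiplet_id].append(chiplet_id % channel_count_available)
--     return {chiplet_id: tuple(channel_ids) for chiplet_id, channel_ids in mapping.items()}
-- ===== SOURCE B (Python) =====
-- def _channel_ids_by_chiplet(chiplet_count, channel_count_available):
--     if chiplet_count <= 0 or channel_count_available <= 0:
--         return {chiplet_id: (0,) for chiplet_id in range(max(chiplet_count, 1))}
--     result = {}
--     for chiplet_id in range(chiplet_count):
--         channels = tuple(range(chiplet_id, channel_count_available, chiplet_count))
--         result[chiplet_id] = channels if channels else (chiplet_id % channel_count_available,)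
--     return result
-- ===== Notes on version B (the rewrite author's own statement) =====
-- stated objective: alternative
-- what changed: Replaces A's scatter (iterate channels, dispatch each into a per-chiplet bucket by modulo, then a second repair pass over empty buckets) by a single gather loop over chiplets that computes each chiplet's channel set in closed form as range(chiplet_id, channel_count_available, chiplet_count), falling back inline to (chiplet_id % channel_count_available,) when that stride range is empty.
import Mathlib
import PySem

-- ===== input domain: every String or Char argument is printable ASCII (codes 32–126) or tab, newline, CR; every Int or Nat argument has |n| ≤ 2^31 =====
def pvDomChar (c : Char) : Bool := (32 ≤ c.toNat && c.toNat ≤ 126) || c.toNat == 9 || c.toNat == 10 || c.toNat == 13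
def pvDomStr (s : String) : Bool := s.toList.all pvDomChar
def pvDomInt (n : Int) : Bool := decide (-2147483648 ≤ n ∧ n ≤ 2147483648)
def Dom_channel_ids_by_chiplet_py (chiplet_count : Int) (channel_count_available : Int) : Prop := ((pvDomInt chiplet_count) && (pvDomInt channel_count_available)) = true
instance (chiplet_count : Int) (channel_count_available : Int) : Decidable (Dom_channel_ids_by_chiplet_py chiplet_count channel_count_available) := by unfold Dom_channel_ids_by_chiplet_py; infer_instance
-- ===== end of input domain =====

-- B replaces A's channel-scatter-plus-repair-pass by a per-chiplet closed-form stride range (alternative decomposition, same cost).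

-- ===== PORT A =====
-- literal transliteration of A: bucket dict keyed by range(chiplet_count), scatter
-- channels by modulo, repair empty buckets, then rebuild the dict as items.
def channel_ids_by_chiplet_py (chiplet_count : Int) (channel_count_available : Int) : List (Int × List Int) :=
  if chiplet_count ≤ 0 ∨ channel_count_available ≤ 0 then
    (PySem.List.pyRange 0 (max chiplet_count 1) 1).map (fun c => (c, [0]))
  else
    let d0 : PySem.Dict Int (List Int) :=
      (PySem.List.pyRange 0 chiplet_count 1).foldl (fun d c => d.insert c []) PySem.Dict.empty
    let d1 :=
      (PySem.List.pyRange 0 channel_count_available 1).foldl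
        (fun d i => d.modify (PySem.Int.mod i chiplet_count) [] (fun v => v ++ [i])) d0
    let d2 :=
      (PySem.List.pyRange 0 chiplet_count 1).foldl
        (fun d c => if d.getD c [] = [] then d.modify c [] (fun v => v ++ [PySem.Int.mod c channel_count_available]) else d) d1
    d2.items.map (fun p => (p.1, p.2))

-- ===== PORT B =====
-- literal transliteration of B: one loop over chiplets, each chiplet's channels as a
-- stride range, inline fallback when the stride range is empty.
def channel_ids_by_chiplet_py_alt (chiplet_count : Int) (channel_count_available : Int) : List (Int × List Int) :=
  if chiplet_count ≤ 0 ∨ channel_count_available ≤ 0 then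
    (PySem.List.pyRange 0 (max chiplet_count 1) 1).map (fun c => (c, [0]))
  else
    (PySem.List.pyRange 0 chiplet_count 1).map (fun c =>
      let channels := PySem.List.pyRange c channel_count_available chiplet_count
      (c, if channels = [] then [PySem.Int.mod c channel_count_available] else channels))

-- ===== PRECONDITION & SPEC =====
def Spec_channel_ids_by_chiplet_py (chiplet_count : Int) (channel_count_available : Int) (out : List (Int × List Int)) : Prop := out = channel_ids_by_chiplet_py_alt chiplet_count channel_count_available
instance (chiplet_count : Int) (channel_count_available : Int) (out : List (Int × List Int)) : Decidable (Spec_channel_ids_by_chiplet_py chiplet_count channel_count_available out) := by unfold Spec_channel_ids_by_chiplet_py; infer_instance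

-- ===== CLAIM (what is proved, stated in full; the proofs are below) =====
def Claim_equal_channel_ids_by_chiplet_py : Prop := ∀ (chiplet_count : Int) (channel_count_available : Int), Dom_channel_ids_by_chiplet_py chiplet_count channel_count_available → Spec_channel_ids_by_chiplet_py chiplet_count channel_count_available (channel_ids_by_chiplet_py chiplet_count channel_count_available)

-- ===== LEMMAS AND PROOFS =====

-- the stride range pyRange c n k (k > 0) is strictly increasing
lemma pairwise_lt_pyRange_stride (c n k : Int) (hk : 0 < k) :
    List.Pairwise (· < ·) (PySem.List.pyRange c n k) := by
  rw [PySem.List.pyRange_of_pos _ _ hk]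
  refine List.Pairwise.map _ (fun a b h => ?_) (List.pairwise_lt_range)
  have : (a : Int) < (b : Int) := by exact_mod_cast h
  nlinarith

-- membership in the stride range, for 0 ≤ c < k
lemma mem_pyRange_stride (c n k x : Int) (hk : 0 < k) (hc0 : 0 ≤ c) (hck : c < k) :
    x ∈ PySem.List.pyRange c n k ↔ 0 ≤ x ∧ x < n ∧ PySem.Int.mod x k = c := by
  rw [PySem.List.mem_pyRange_iff_of_pos hk, PySem.Int.mod_eq_emod_of_pos hk]
  constructor
  · rintro ⟨h1, h2, q, hq⟩
    refine ⟨by omega, h2, ?_⟩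
    have : x = k * q + c := by omega
    subst this
    rw [add_comm, Int.add_mul_emod_self_left]
    exact Int.emod_eq_of_lt hc0 hck
  · rintro ⟨h1, h2, h3⟩
    have hx : x % k = c := h3
    have hxe : x = k * (x / k) + x % k := (Int.ediv_add_emod x k).symm
    have hdiv : 0 ≤ x / k := Int.ediv_nonneg h1 (le_of_lt hk)
    have hmul : 0 ≤ k * (x / k) := mul_nonneg (le_of_lt hk) hdiv
    refine ⟨by omega, h2, ⟨x / k, by omega⟩⟩

-- the filter form of A's scatter equals B's stride range
lemma filter_mod_eq_stride (c n k : Int) (hk : 0 < k) (hc0 : 0 ≤ c) (hck : c < k) :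
    (PySem.List.pyRange 0 n 1).filter (fun i => PySem.Int.mod i k == c) =
      PySem.List.pyRange c n k := by
  refine List.eq_of_perm_of_sorted (le := (· < ·))
    (fun a b _ _ hab hba => absurd hab (lt_asymm hba))
    (List.Pairwise.filter _ (PySem.List.pairwise_lt_pyRange_one 0 n))
    (pairwise_lt_pyRange_stride c n k hk) ?_
  rw [List.perm_ext_iff_of_nodup
    ((PySem.List.nodup_pyRange_one 0 n).filter _)
    (pairwise_lt_pyRange_stride c n k hk).nodup]
  intro x
  rw [List.mem_filter, PySem.List.mem_pyRange_one, mem_pyRange_stride c n k x hk hc0 hck]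
  simp only [beq_iff_eq]
  tauto

-- A's scatter loop, rewritten as a fold over (key, value) pairs
lemma scatter_eq_pairs (n k : Int) (d : PySem.Dict Int (List Int)) :
    (PySem.List.pyRange 0 n 1).foldl
        (fun d i => d.modify (PySem.Int.mod i k) [] (fun v => v ++ [i])) d
      = ((PySem.List.pyRange 0 n 1).map (fun i => (PySem.Int.mod i k, i))).foldl
        (fun d p => d.modify p.1 [] (fun v => v ++ [p.2])) d := by
  rw [List.foldl_map]

-- keys of a dict are invariant under a fold whose steps preserve them
lemma keys_foldl_invariant {α : Type} (step : PySem.Dict Int (List Int) → α → PySem.Dict Int (List Int))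
    (K : List Int) (l : List α)
    (hstep : ∀ d x, d.keys = K → x ∈ l → (step d x).keys = K) :
    ∀ d : PySem.Dict Int (List Int), d.keys = K → (l.foldl step d).keys = K := by
  induction l with
  | nil => intro d hd; simpa using hd
  | cons x xs ih =>
      intro d hd
      simp only [List.foldl_cons]
      exact ih (fun d' y hd' hy => hstep d' y hd' (List.mem_cons_of_mem _ hy)) _
        (hstep d x hd (List.mem_cons_self))

-- A's repair fold leaves keys not in the iterated list untouched
lemma getD_repair_not_mem (n : Int) (l : List Int) (c : Int) (hc : c ∉ l) :
    ∀ d : PySem.Dict Int (List Int),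
      (l.foldl (fun d c' => if d.getD c' [] = [] then d.modify c' [] (fun v => v ++ [PySem.Int.mod c' n]) else d) d).getD c []
        = d.getD c [] := by
  induction l with
  | nil => intro d; rfl
  | cons x xs ih =>
      intro d
      have hxc : c ≠ x := fun h => hc (h ▸ List.mem_cons_self)
      simp only [List.foldl_cons]
      rw [ih (fun h => hc (List.mem_cons_of_mem _ h))]
      split
      · rw [PySem.Dict.getD_modify]; simp [hxc]
      · rfl

-- value at a key after A's repair fold, for Nodup iteration lists
lemma getD_repair (n : Int) (l : List Int) (hnd : l.Nodup) (c : Int) (hc : c ∈ l) :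
    ∀ d : PySem.Dict Int (List Int),
      (l.foldl (fun d c' => if d.getD c' [] = [] then d.modify c' [] (fun v => v ++ [PySem.Int.mod c' n]) else d) d).getD c []
        = (if d.getD c [] = [] then [PySem.Int.mod c n] else d.getD c []) := by
  induction l with
  | nil => cases hc
  | cons x xs ih =>
      intro d
      simp only [List.foldl_cons]
      rcases List.mem_cons.mp hc with rfl | hmem
      · have hcx : c ∉ xs := (List.nodup_cons.mp hnd).1
        rw [getD_repair_not_mem n xs c hcx]
        split
        · rw [PySem.Dict.getD_modify]; simp_all
        · rfl
      · rw [ih (List.nodup_cons.mp hnd).2 hmem]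
        have hcx : c ≠ x := by
          intro h; subst h; exact (List.nodup_cons.mp hnd).1 hmem
        split
        · rw [PySem.Dict.getD_modify]; simp [hcx]
        · rfl

-- ===== VERDICT (by name: the statement is the Claim_ definition above) =====
theorem channel_ids_by_chiplet_py_spec : Claim_equal_channel_ids_by_chiplet_py := by
  intro k n _
  unfold Spec_channel_ids_by_chiplet_py channel_ids_by_chiplet_py channel_ids_by_chiplet_py_alt
  by_cases hdeg : k ≤ 0 ∨ n ≤ 0
  · simp [hdeg]
  · simp only [hdeg, if_false]
    push_neg at hdeg
    obtain ⟨hk, hn⟩ := hdeg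
    rw [Int.lt_iff_add_one_le] at hk hn
    have hk : 0 < k := by omega
    have hn : 0 < n := by omega
    set R := PySem.List.pyRange 0 k 1 with hR
    have hndR : R.Nodup := PySem.List.nodup_pyRange_one 0 k
    set d0 : PySem.Dict Int (List Int) :=
      R.foldl (fun d c => d.insert c []) PySem.Dict.empty with hd0
    have h0items : d0.items = R.map (fun c => (c, ([] : List Int))) := by
      rw [hd0]
      have := PySem.Dict.items_foldl_insert_fresh R (fun c => c) (fun _ => ([] : List Int))
        PySem.Dict.empty (by intro a _; simp [PySem.Dict.contains_empty])
        (by simpa using hndR)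
      simpa using this
    have h0keys : d0.keys = R := by
      simp [PySem.Dict.keys, h0items, List.map_map, Function.comp_def]
    have h0getD : ∀ c ∈ R, d0.getD c [] = [] := by
      intro c hc
      exact PySem.Dict.getD_of_mem_items d0
        (h0items ▸ List.mem_map_of_mem hc) (h0keys ▸ hndR) []
    have hmemkey : ∀ i : Int, PySem.Int.mod i k ∈ R := by
      intro i
      rw [hR, PySem.List.mem_pyRange_one, PySem.Int.mod_eq_emod_of_pos hk]
      exact ⟨Int.emod_nonneg i (by omega), Int.emod_lt_of_pos i hk⟩
    set d1 := (PySem.List.pyRange 0 n 1).foldl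
      (fun d i => d.modify (PySem.Int.mod i k) [] (fun v => v ++ [i])) d0 with hd1
    have h1keys : d1.keys = R := by
      rw [hd1]
      refine keys_foldl_invariant _ R _ ?_ d0 h0keys
      intro d i hdk _
      rw [PySem.Dict.keys_modify, PySem.Dict.keys_insert_of_contains]
      · exact hdk
      · rw [PySem.Dict.contains_iff_mem_keys, hdk]; exact hmemkey i
    have h1getD : ∀ c ∈ R, d1.getD c [] = PySem.List.pyRange c n k := by
      intro c hc
      have hc0 : 0 ≤ c := ((PySem.List.mem_pyRange_one).mp hc).1
      have hck : c < k := ((PySem.List.mem_pyRange_one).mp hc).2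
      rw [hd1, scatter_eq_pairs n k d0]
      rw [PySem.Dict.getD_foldl_modify_append, h0getD c hc, List.nil_append,
        List.filter_map, List.map_map]
      have : ((fun (x : Int × Int) => x.2) ∘ fun i => (PySem.Int.mod i k, i)) = id := rfl
      rw [this, List.map_id]
      exact filter_mod_eq_stride c n k hk hc0 hck
    set d2 := R.foldl
      (fun d c => if d.getD c [] = [] then d.modify c [] (fun v => v ++ [PySem.Int.mod c n]) else d) d1 with hd2
    have h2keys : d2.keys = R := by
      rw [hd2]
      refine keys_foldl_invariant _ R _ ?_ d1 h1keys
      intro d c hdk hcl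
      split
      · rw [PySem.Dict.keys_modify, PySem.Dict.keys_insert_of_contains]
        · exact hdk
        · rw [PySem.Dict.contains_iff_mem_keys, hdk]; exact hcl
      · exact hdk
    have h2getD : ∀ c ∈ R, d2.getD c [] =
        (if PySem.List.pyRange c n k = [] then [PySem.Int.mod c n]
         else PySem.List.pyRange c n k) := by
      intro c hc
      rw [hd2, getD_repair n R hndR c hc d1, h1getD c hc]
    rw [PySem.Dict.items_eq_map_keys d2 (h2keys ▸ hndR) [], h2keys, List.map_map]
    refine List.map_congr_left ?_
    intro c hc
    simp only [Function.comp]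
    rw [h2getD c hc]
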